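-- pv_equiv track=rewrite | github.com/21rahulsharma/python_all | DSA/test.py | powerup
-- ===== SOURCE A (Python) =====
-- from typing import List
--
-- def powerup(N : int, K : int, energyArr : List[int]) -> int:
--     # code here
--     l=len(energyArr)
--     c=l-2
--     flag=False
--     for i in range(l-2,-1,-1):
--         req=0
--         for j in range(i,l-1,1):
--
--             req=req+energyArr[j+1]
--         if(energyArr[i]==0):
--                 req=req-K
--         if(req<K):
--             flag=True
--             return i
--             break
-- ===== SOURCE B (Python) =====
-- def powerup(N, K, energyArr):
--     # O(n): single reverse pass keeping a running suffix sum instead of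
--     # recomputing the suffix sum for every index.
--     s = 0
--     i = len(energyArr) - 2
--     rev = energyArr[::-1]
--     for nxt, cur in zip(rev, rev[1:]):
--         s += nxt
--         req = s - K if cur == 0 else s
--         if req < K:
--             return i
--         i -= 1
--     return None
-- ===== Notes on version B (the rewrite author's own statement) =====
-- stated objective: faster
-- what changed: Replaces the nested loop that recomputes each suffix sum from scratch with a single reverse pass over adjacent pairs of the reversed list, maintaining an incremental running suffix sum.
import Mathlib
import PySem

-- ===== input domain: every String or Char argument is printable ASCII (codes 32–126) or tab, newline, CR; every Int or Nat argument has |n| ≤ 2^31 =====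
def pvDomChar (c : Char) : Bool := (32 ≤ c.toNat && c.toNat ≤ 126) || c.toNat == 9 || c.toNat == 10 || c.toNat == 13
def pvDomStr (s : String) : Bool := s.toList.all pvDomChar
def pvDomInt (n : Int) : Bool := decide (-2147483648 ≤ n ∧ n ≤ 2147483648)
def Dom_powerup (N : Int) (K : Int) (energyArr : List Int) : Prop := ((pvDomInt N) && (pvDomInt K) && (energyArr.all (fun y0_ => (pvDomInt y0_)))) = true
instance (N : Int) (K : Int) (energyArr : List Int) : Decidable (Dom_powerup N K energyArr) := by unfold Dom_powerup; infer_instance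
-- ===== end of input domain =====

-- B replaces A's per-index inner summation with a single reverse pass keeping
-- an incremental suffix sum; same return value on every input.

-- ===== PORT A =====
-- 'for i in range(l-2,-1,-1): … return i', falling through to None; the inner
-- 'for j in range(i,l-1): req += energyArr[j+1]' is the foldl. Indexing uses
-- pyGetD, exact here: every index A reads (i and j+1, 0 ≤ · ≤ l-1) is in range.
def powerupA_loop (K : Int) (arr : List Int) (l : Int) : List Int → Option Int
  | [] => none
  | i :: is =>
    let req := (PySem.List.pyRange i (l-1) 1).foldl
        (fun req j => req + PySem.List.pyGetD arr (j+1) 0) 0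
    let req := if PySem.List.pyGetD arr i 0 = 0 then req - K else req
    if req < K then some i else powerupA_loop K arr l is

def powerup (N : Int) (K : Int) (energyArr : List Int) : Option Int :=
  let l : Int := energyArr.length
  powerupA_loop K energyArr l (PySem.List.pyRange (l-2) (-1) (-1))

-- ===== PORT B =====
-- 'for nxt, cur in zip(rev, rev[1:])': structural recursion over adjacent
-- pairs of the reversed list, with running suffix sum s and countdown index i.
def powerupB_loop (K : Int) : Int → Int → List Int → Option Int
  | s, i, nxt :: cur :: rest =>
    let s' := s + nxt
    let req := if cur = 0 then s' - K else s'
    if req < K then some i else powerupB_loop K s' (i-1) (cur :: rest)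
  | _, _, _ => none

def powerup_alt (N : Int) (K : Int) (energyArr : List Int) : Option Int :=
  powerupB_loop K 0 ((energyArr.length : Int) - 2) energyArr.reverse

-- ===== PRECONDITION & SPEC =====
def Spec_powerup (N : Int) (K : Int) (energyArr : List Int) (out : Option Int) : Prop := out = powerup_alt N K energyArr
instance (N : Int) (K : Int) (energyArr : List Int) (out : Option Int) : Decidable (Spec_powerup N K energyArr out) := by unfold Spec_powerup; infer_instance

-- ===== CLAIM (what is proved, stated in full; the proofs are below) =====
def Claim_equal_powerup : Prop := ∀ (N : Int) (K : Int) (energyArr : List Int), Dom_powerup N K energyArr → Spec_powerup N K energyArr (powerup N K energyArr)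

-- ===== LEMMAS AND PROOFS =====

-- A's inner loop computes the suffix sum of arr starting at index a+1.
lemma innerA_sum (arr : List Int) (a : Int) (ha : 0 ≤ a) :
    (PySem.List.pyRange a ((arr.length : Int) - 1) 1).foldl
      (fun req j => req + PySem.List.pyGetD arr (j+1) 0) 0
    = (arr.drop (a+1).toNat).sum := by
  have hshift : (PySem.List.pyRange a ((arr.length : Int) - 1) 1).foldl
      (fun req j => req + PySem.List.pyGetD arr (j+1) 0) 0
    = (PySem.List.pyRange (a+1) ((arr.length : Int)) 1).foldl
      (fun req j => req + PySem.List.pyGetD arr j 0) 0 := by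
    rw [PySem.List.pyRange_one a, PySem.List.pyRange_one (a+1),
        List.foldl_map, List.foldl_map]
    have h : ((arr.length : Int) - 1 - a).toNat = ((arr.length : Int) - (a+1)).toNat := by omega
    rw [h]
    congr 1
    funext r k
    congr 2
    ring
  rw [hshift, PySem.List.foldl_pyRange_pyGetD' arr 0 (· + ·) 0 (by omega)]
  rw [List.sum_eq_foldl]

-- Lockstep correspondence of the two loops: p is the unprocessed prefix,
-- x :: tail the already-summed suffix (B's s = tail.sum before adding x).
lemma loop_eq (K : Int) : ∀ (p : List Int) (x : Int) (tail : List Int),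
    powerupA_loop K (p ++ x :: tail) ((p ++ x :: tail).length : Int)
        (PySem.List.pyRange ((p.length : Int) - 1) (-1) (-1))
    = powerupB_loop K tail.sum ((p.length : Int) - 1) (x :: p.reverse) := by
  intro p
  induction p using List.reverseRecOn with
  | nil =>
    intro x tail
    rw [PySem.List.pyRange_neg_one_eq_nil (by simp)]
    simp [powerupA_loop, powerupB_loop]
  | append_singleton q c ih =>
    intro x tail
    have harr : (q ++ [c]) ++ x :: tail = q ++ (c :: x :: tail) := by simp
    have hi : (((q ++ [c]).length : Int) - 1) = (q.length : Int) := by simp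
    rw [hi, PySem.List.pyRange_neg_one_cons (by omega)]
    have hreq : (PySem.List.pyRange (q.length : Int) (((q ++ [c]) ++ x :: tail).length - 1) 1).foldl
        (fun req j => req + PySem.List.pyGetD ((q ++ [c]) ++ x :: tail) (j+1) 0) 0
        = x + tail.sum := by
      rw [innerA_sum _ _ (by omega)]
      have hd : (((q.length : Int)) + 1).toNat = (q ++ [c]).length := by simp
      rw [hd, List.drop_left]
      simp
    have hget : PySem.List.pyGetD ((q ++ [c]) ++ x :: tail) (q.length : Int) 0 = c := by
      rw [harr, PySem.List.pyGetD_natCast]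
      simp [List.getD_eq_getElem?_getD]
    rw [powerupA_loop]
    simp only [hreq, hget]
    rw [show (q ++ [c]).reverse = c :: q.reverse by simp, powerupB_loop]
    have ih' := ih c (x :: tail)
    rw [List.sum_cons] at ih'
    rw [harr, ih']
    rw [Int.add_comm tail.sum x]

-- ===== VERDICT (by name: the statement is the Claim_ definition above) =====
theorem powerup_spec : Claim_equal_powerup := by
  intro N K arr _
  unfold Spec_powerup powerup powerup_alt
  rcases List.eq_nil_or_concat arr with rfl | ⟨p, x, rfl⟩
  · simp only [List.length_nil, Nat.cast_zero, List.reverse_nil]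
    rw [PySem.List.pyRange_neg_one_eq_nil (by norm_num)]
    simp [powerupA_loop, powerupB_loop]
  · rw [List.concat_eq_append]
    have hl : ((p ++ [x]).length : Int) - 2 = (p.length : Int) - 1 := by simp; omega
    have h := loop_eq K p x []
    simp only [List.sum_nil] at h
    show powerupA_loop K (p ++ [x]) ((p ++ [x]).length : Int)
        (PySem.List.pyRange (((p ++ [x]).length : Int) - 2) (-1) (-1))
      = powerupB_loop K 0 (((p ++ [x]).length : Int) - 2) (p ++ [x]).reverse
    rw [hl, show (p ++ [x]).reverse = x :: p.reverse by simp]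
    exact h
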